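-- pv_equiv track=rewrite | github.com/Kevin-Ziegler/ARG_ML_Simulation_Pipeline | ResultsToCSV_RentPlus.py | parseUnderScores
-- ===== SOURCE A (Python) =====
-- def parseUnderScores(x, begin, end):
-- 	count_ = 0
-- 	temp = ""
--
-- 	for i in range(0, len(x)):
-- 		if x[i] == "_":
-- 			count_+=1
-- 			if count_ == end:
-- 				break
-- 		else:
-- 			if count_ >= begin and count_ < end:
-- 				temp = temp + x[i]
-- 	return temp
-- ===== SOURCE B (Python) =====
-- def parseUnderScores(x, begin, end):
--     return "".join(f for i, f in enumerate(x.split("_")) if begin <= i < end)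
-- ===== Notes on version B (the rewrite author's own statement) =====
-- stated objective: idiomatic
-- what changed: Replaces the per-character counting loop (manual threshold comparisons and break) by the standard split-then-select idiom: split x on '_' into fields and join the fields whose index lies in [begin, end); measured faster since the scan happens inside C-level str.split/join instead of a Python-level char loop.
import Mathlib
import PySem

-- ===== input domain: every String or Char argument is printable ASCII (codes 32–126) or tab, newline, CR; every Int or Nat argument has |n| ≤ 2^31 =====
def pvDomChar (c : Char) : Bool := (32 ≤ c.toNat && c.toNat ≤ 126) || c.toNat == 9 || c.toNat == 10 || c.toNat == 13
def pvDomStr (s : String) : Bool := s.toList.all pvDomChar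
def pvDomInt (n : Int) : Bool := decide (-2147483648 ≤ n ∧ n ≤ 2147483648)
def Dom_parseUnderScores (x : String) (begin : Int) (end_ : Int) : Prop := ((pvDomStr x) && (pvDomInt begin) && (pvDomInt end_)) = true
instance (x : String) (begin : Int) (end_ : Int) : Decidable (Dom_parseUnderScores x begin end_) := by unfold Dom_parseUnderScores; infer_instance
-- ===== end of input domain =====

-- B replaces A's per-character counting loop by the idiomatic split-on-'_' then join of the
-- fields whose index lies in [begin, end); a timing run measured B faster (C-level split).

-- ===== PORT A =====
-- the for-loop over the characters of x with state (count_, temp); 'break' = return temp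
def parseUnderScoresLoop (cs : List Char) (count : Int) (temp : List Char)
    (begin : Int) (end_ : Int) : List Char :=
  match cs with
  | [] => temp
  | c :: rest =>
    if c = '_' then
      if count + 1 = end_ then temp
      else parseUnderScoresLoop rest (count + 1) temp begin end_
    else
      if begin ≤ count ∧ count < end_ then
        parseUnderScoresLoop rest count (temp ++ [c]) begin end_
      else
        parseUnderScoresLoop rest count temp begin end_

def parseUnderScores (x : String) (begin : Int) (end_ : Int) : String :=
  String.ofList (parseUnderScoresLoop x.toList 0 [] begin end_)

-- ===== PORT B =====
def parseUnderScores_alt (x : String) (begin : Int) (end_ : Int) : String :=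
  -- "".join(f for i, f in enumerate(x.split("_")) if begin <= i < end)
  String.ofList (PySem.Chars.join []
    (((PySem.List.enumerate (PySem.Chars.splitOn x.toList ['_'])).filter
        (fun p => decide (begin ≤ p.1) && decide (p.1 < end_))).map (·.2)))

-- ===== PRECONDITION & SPEC =====
def Spec_parseUnderScores (x : String) (begin : Int) (end_ : Int) (out : String) : Prop := out = parseUnderScores_alt x begin end_
instance (x : String) (begin : Int) (end_ : Int) (out : String) : Decidable (Spec_parseUnderScores x begin end_ out) := by unfold Spec_parseUnderScores; infer_instance

-- ===== CLAIM (what is proved, stated in full; the proofs are below) =====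
def Claim_equal_parseUnderScores : Prop := ∀ (x : String) (begin : Int) (end_ : Int), Dom_parseUnderScores x begin end_ → Spec_parseUnderScores x begin end_ (parseUnderScores x begin end_)

-- ===== LEMMAS AND PROOFS =====

-- reference splitter: split on '_' with an accumulator for the (reversed) current field
def mySplit : List Char → List Char → List (List Char)
  | [], cur => [cur.reverse]
  | c :: rest, cur => if c = '_' then cur.reverse :: mySplit rest [] else mySplit rest (c :: cur)

-- PySem's fuel-based splitOn.go, single-char sep, enough fuel = mySplit
theorem splitOn_go_eq (l : List Char) : ∀ (fuel : Nat) (cur : List Char) (acc : List (List Char)),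
    l.length < fuel →
    PySem.Chars.splitOn.go ['_'] fuel l cur acc = acc.reverse ++ mySplit l cur := by
  induction l with
  | nil =>
    intro fuel cur acc h
    match fuel with
    | fuel + 1 => simp [PySem.Chars.splitOn.go, mySplit]
  | cons c rest ih =>
    intro fuel cur acc h
    match fuel with
    | fuel + 1 =>
      simp only [List.length_cons] at h
      by_cases hc : c = '_'
      · subst hc
        rw [PySem.Chars.splitOn.go]
        simp only [List.isPrefixOf, beq_self_eq_true, Bool.true_and,
          if_true, List.length_singleton, List.drop_succ_cons, List.drop_zero]
        rw [ih fuel [] (List.reverse cur :: acc) (by omega)]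
        simp [mySplit]
      · have hpre : List.isPrefixOf ['_'] (c :: rest) = false := by
          simp [List.isPrefixOf]
          exact fun h => hc h.symm
        rw [PySem.Chars.splitOn.go]
        simp only [hpre, Bool.false_eq_true, if_false]
        rw [ih fuel (c :: cur) acc (by omega)]
        simp [mySplit, hc]

theorem splitOn_eq_mySplit (l : List Char) :
    PySem.Chars.splitOn l ['_'] = mySplit l [] := by
  rw [PySem.Chars.splitOn, splitOn_go_eq l (l.length + 1) [] [] (by omega)]
  simp

-- the selected-fields concatenation both programs compute
def selJoin (fields : List (List Char)) (i begin end_ : Int) : List Char :=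
  match fields with
  | [] => []
  | f :: fs => (if begin ≤ i ∧ i < end_ then f else []) ++ selJoin fs (i + 1) begin end_

theorem selJoin_of_le (fields : List (List Char)) : ∀ (i begin end_ : Int),
    end_ ≤ i → selJoin fields i begin end_ = [] := by
  induction fields with
  | nil => intro i b e _; rfl
  | cons f fs ih =>
    intro i b e h
    simp only [selJoin, if_neg (by omega : ¬ (b ≤ i ∧ i < e))]
    exact ih (i + 1) b e (by omega)

theorem mySplit_ne_nil (l : List Char) : ∀ cur, mySplit l cur ≠ [] := by
  induction l with
  | nil => intro cur; simp [mySplit]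
  | cons c rest ih =>
    intro cur
    by_cases hc : c = '_' <;> simp [mySplit, hc, ih]

-- pulling the accumulated prefix out of mySplit
theorem mySplit_cur (l : List Char) : ∀ cur,
    mySplit l cur = (cur.reverse ++ (mySplit l []).headI) :: (mySplit l []).tail := by
  induction l with
  | nil => intro cur; simp [mySplit]
  | cons c rest ih =>
    intro cur
    by_cases hc : c = '_'
    · simp [mySplit, hc]
    · simp only [mySplit, if_neg hc]
      rw [ih (c :: cur), ih [c]]
      simp

-- main loop invariant: A's loop appends exactly the selected fields of the split of the rest
theorem loop_eq_selJoin (cs : List Char) : ∀ (count : Int) (temp : List Char) (begin end_ : Int),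
    parseUnderScoresLoop cs count temp begin end_ =
      temp ++ selJoin (mySplit cs []) count begin end_ := by
  induction cs with
  | nil => intro count temp b e; simp [parseUnderScoresLoop, mySplit, selJoin]
  | cons c rest ih =>
    intro count temp b e
    by_cases hc : c = '_'
    · subst hc
      simp only [parseUnderScoresLoop, if_true, mySplit, List.reverse_nil]
      have hsel : selJoin ([] :: mySplit rest []) count b e =
          selJoin (mySplit rest []) (count + 1) b e := by
        simp [selJoin]
      by_cases he : count + 1 = e
      · rw [if_pos he, hsel, selJoin_of_le _ _ _ _ (by omega)]
        simp
      · rw [if_neg he, hsel, ih]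
    · have hsplit : mySplit (c :: rest) [] =
          (c :: (mySplit rest []).headI) :: (mySplit rest []).tail := by
        simp only [mySplit, if_neg hc]
        rw [mySplit_cur rest [c]]
        simp
      have hrest : mySplit rest [] = (mySplit rest []).headI :: (mySplit rest []).tail := by
        cases h : mySplit rest [] with
        | nil => exact absurd h (mySplit_ne_nil rest [])
        | cons a l => simp
      simp only [parseUnderScoresLoop, if_neg hc, hsplit, selJoin]
      by_cases hs : b ≤ count ∧ count < e
      · rw [if_pos hs, if_pos hs, ih]
        conv_lhs => rw [hrest]
        simp [selJoin, if_pos hs]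
      · rw [if_neg hs, if_neg hs, ih]
        conv_lhs => rw [hrest]
        simp [selJoin, if_neg hs]

-- B's enumerate/filter/map/join computes selJoin
theorem enum_filter_eq_selJoin (fields : List (List Char)) : ∀ (i begin end_ : Int),
    (((PySem.List.enumerate fields i).filter
        (fun p => decide (begin ≤ p.1) && decide (p.1 < end_))).map (·.2)).flatten =
      selJoin fields i begin end_ := by
  induction fields with
  | nil => intro i b e; simp [PySem.List.enumerate_nil, selJoin]
  | cons f fs ih =>
    intro i b e
    rw [PySem.List.enumerate_cons]
    by_cases hs : b ≤ i ∧ i < e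
    · simp [hs.1, hs.2, selJoin, ih]
    · have : (decide (b ≤ i) && decide (i < e)) = false := by
        rcases not_and_or.mp hs with h | h <;> simp [h]
      simp only [List.filter_cons, this, Bool.false_eq_true, if_false, selJoin, if_neg hs, ih]
      simp

theorem flatten_intersperse_nil : ∀ (l : List (List Char)),
    (List.intersperse ([] : List Char) l).flatten = l.flatten
  | [] => rfl
  | [a] => rfl
  | a :: b :: t => by
      simp only [List.intersperse, List.flatten_cons, flatten_intersperse_nil (b :: t)]
      simp

-- ===== VERDICT (by name: the statement is the Claim_ definition above) =====
theorem parseUnderScores_spec : Claim_equal_parseUnderScores := by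
  intro x b e _
  unfold Spec_parseUnderScores parseUnderScores parseUnderScores_alt
  rw [loop_eq_selJoin, splitOn_eq_mySplit, PySem.Chars.join, List.intercalate,
    flatten_intersperse_nil, enum_filter_eq_selJoin]
  rfl
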